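-- pv_equiv track=rewrite | github.com/EvoEvolver/Forest | test/editor.py | find_title
-- ===== SOURCE A (Python) =====
-- def find_title(markdown):
--     title = None
--     for line in markdown.split("\n"):
--         line = line.strip()
--         if line.startswith("# "):
--             title = line[2:]
--             title = title.strip()
--             break
--     return title
-- ===== SOURCE B (Python) =====
-- import re
--
-- # One regex search over the whole markdown instead of a per-line scan-and-break loop.
-- _TITLE_RE = re.compile(r'^[^\S\n]*# [^\S\n]*(\S.*)$', re.MULTILINE)
--
-- def find_title(markdown):
--     m = _TITLE_RE.search(markdown)
--     return m.group(1).rstrip() if m else None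
-- ===== Notes on version B (the rewrite author's own statement) =====
-- stated objective: idiomatic
-- what changed: Replaced the explicit split/strip/startswith/break line loop with a single precompiled MULTILINE regex search over the whole markdown that captures the title directly.
import Mathlib
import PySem

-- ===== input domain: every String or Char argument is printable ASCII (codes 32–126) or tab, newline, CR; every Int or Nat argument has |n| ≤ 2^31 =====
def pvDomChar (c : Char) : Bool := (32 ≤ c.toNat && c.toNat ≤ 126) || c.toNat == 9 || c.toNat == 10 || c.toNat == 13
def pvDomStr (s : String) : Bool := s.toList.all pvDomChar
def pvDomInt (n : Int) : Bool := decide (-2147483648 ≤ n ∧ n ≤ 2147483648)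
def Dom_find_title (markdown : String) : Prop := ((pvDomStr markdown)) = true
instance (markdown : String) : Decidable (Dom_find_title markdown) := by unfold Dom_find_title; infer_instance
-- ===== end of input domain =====

-- B replaces A's per-line strip/startswith loop by one MULTILINE regex search; objective: idiomatic.

-- ===== PORT A =====
-- the for-loop with break: structural recursion over the lines of markdown.split("\n")
def findTitleLoopA : List (List Char) → Option String
  | [] => none
  | l :: rest =>
      let line := PySem.Chars.strip l
      if PySem.Chars.startswith line ['#', ' '] then
        some (String.ofList (PySem.Chars.strip (PySem.Chars.slice line (some 2) none)))
      else findTitleLoopA rest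

def find_title (markdown : String) : Option String :=
  findTitleLoopA (PySem.Chars.splitOn markdown.toList ['\n'])

-- ===== PORT B =====
-- Hand port of the regex r'^[^\S\n]*# [^\S\n]*(\S.*)$' with re.MULTILINE: '^'/'$' anchor at
-- '\n' boundaries and neither '.', '[^\S\n]' nor '\S' can match '\n', so re.search over the whole
-- text is exactly the first per-line match over the '\n'-decomposition; within a line (no '\n')
-- the class [^\S\n] is exactly PySem.Chars.isspace. Exact on the ASCII domain (no '\v'/'\f').
def pvRegexLineB (cs : List Char) : Option (List Char) :=
  match cs.dropWhile PySem.Chars.isspace with      -- ^[^\S\n]*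
  | c :: c2 :: t =>
      if c = '#' ∧ c2 = ' ' then                   -- the literal "# " of the pattern
        match t.dropWhile PySem.Chars.isspace with -- [^\S\n]*
        | [] => none                               -- no \S before line end: no match on this line
        | t' => some (PySem.Chars.rstrip t')       -- (\S.*)$ captured, then m.group(1).rstrip()
      else none
  | _ => none

def find_title_alt (markdown : String) : Option String :=
  ((PySem.Chars.splitOn markdown.toList ['\n']).findSome? pvRegexLineB).map String.ofList

-- ===== PRECONDITION & SPEC =====
def Spec_find_title (markdown : String) (out : Option String) : Prop := out = find_title_alt markdown
instance (markdown : String) (out : Option String) : Decidable (Spec_find_title markdown out) := by unfold Spec_find_title; infer_instance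

-- ===== CLAIM (what is proved, stated in full; the proofs are below) =====
def Claim_equal_find_title : Prop := ∀ (markdown : String), Dom_find_title markdown → Spec_find_title markdown (find_title markdown)

-- ===== LEMMAS AND PROOFS =====

-- rstrip unfolding on a cons cell
theorem pv_rstrip_cons (a : Char) (l : List Char) :
    PySem.Chars.rstrip (a :: l) =
      if PySem.Chars.rstrip l = [] then (if PySem.Chars.isspace a then [] else [a])
      else a :: PySem.Chars.rstrip l := by
  simp only [PySem.Chars.rstrip, List.reverse_cons, List.dropWhile_append, List.isEmpty_iff,
    List.reverse_eq_nil_iff]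
  by_cases h : List.dropWhile PySem.Chars.isspace l.reverse = [] <;>
    by_cases ha : PySem.Chars.isspace a <;>
      simp [h, ha, List.dropWhile]

theorem pv_rstrip_cons_not {a : Char} (h : PySem.Chars.isspace a = false) (l : List Char) :
    PySem.Chars.rstrip (a :: l) = a :: PySem.Chars.rstrip l := by
  rw [pv_rstrip_cons]
  by_cases h' : PySem.Chars.rstrip l = [] <;> simp [h', h]

theorem pv_rstrip_eq_nil_iff (l : List Char) :
    PySem.Chars.rstrip l = [] ↔ ∀ x ∈ l, PySem.Chars.isspace x = true := by
  simp [PySem.Chars.rstrip, List.reverse_eq_nil_iff, List.dropWhile_eq_nil_iff]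

-- leading-whitespace removal commutes with trailing-whitespace removal
theorem pv_dropWhile_rstrip (l : List Char) :
    (PySem.Chars.rstrip l).dropWhile PySem.Chars.isspace =
      PySem.Chars.rstrip (l.dropWhile PySem.Chars.isspace) := by
  induction l with
  | nil => simp [PySem.Chars.rstrip]
  | cons a t ih =>
    by_cases ha : PySem.Chars.isspace a = true
    · rw [pv_rstrip_cons]
      conv_rhs => rw [List.dropWhile_cons_of_pos ha]
      by_cases h : PySem.Chars.rstrip t = []
      · have hdt : List.dropWhile PySem.Chars.isspace t = [] := by
          rw [List.dropWhile_eq_nil_iff]; exact (pv_rstrip_eq_nil_iff t).mp h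
        rw [if_pos h, if_pos ha, hdt]
        simp [PySem.Chars.rstrip]
      · rw [if_neg h, List.dropWhile_cons_of_pos ha, ih]
    · have ha' : PySem.Chars.isspace a = false := by simpa using ha
      rw [pv_rstrip_cons_not ha', List.dropWhile_cons_of_neg (by simp [ha']),
        List.dropWhile_cons_of_neg (by simp [ha']), pv_rstrip_cons_not ha']

theorem pv_rstrip_idem (l : List Char) :
    PySem.Chars.rstrip (PySem.Chars.rstrip l) = PySem.Chars.rstrip l := by
  simp [PySem.Chars.rstrip, List.dropWhile_idempotent]

-- per-line: A's loop body decision and value coincide with the regex line match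
theorem pv_line_lemma (cs : List Char) :
    (if PySem.Chars.startswith (PySem.Chars.strip cs) ['#', ' '] then
        some (PySem.Chars.strip (PySem.Chars.slice (PySem.Chars.strip cs) (some 2) none))
      else none) = pvRegexLineB cs := by
  have hstrip : PySem.Chars.strip cs =
      PySem.Chars.rstrip (cs.dropWhile PySem.Chars.isspace) := rfl
  have hsgen : ∀ l : List Char, PySem.Chars.strip l =
      PySem.Chars.rstrip (l.dropWhile PySem.Chars.isspace) := fun _ => rfl
  rcases hd : cs.dropWhile PySem.Chars.isspace with _ | ⟨c, _ | ⟨c2, t⟩⟩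
  · have hL : pvRegexLineB cs = none := by unfold pvRegexLineB; rw [hd]
    rw [hstrip, hd, hL]
    decide
  · have hL : pvRegexLineB cs = none := by unfold pvRegexLineB; rw [hd]
    rw [hstrip, hd, hL, pv_rstrip_cons]
    by_cases hc : PySem.Chars.isspace c <;>
      simp [hc, PySem.Chars.rstrip, PySem.Chars.startswith, List.isPrefixOf]
  · have hL : pvRegexLineB cs =
        if c = '#' ∧ c2 = ' ' then
          match t.dropWhile PySem.Chars.isspace with
          | [] => none
          | t' => some (PySem.Chars.rstrip t')
        else none := by unfold pvRegexLineB; rw [hd]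
    by_cases hc : c = '#' ∧ c2 = ' '
    · obtain ⟨rfl, rfl⟩ := hc
      rw [hstrip, hd, hL, if_pos (And.intro rfl rfl), pv_rstrip_cons_not (by decide)]
      by_cases ht : PySem.Chars.rstrip t = []
      · have hst : PySem.Chars.rstrip (' ' :: t) = [] := by
          rw [pv_rstrip_cons, if_pos ht]; decide
        have htd : t.dropWhile PySem.Chars.isspace = [] := by
          rw [List.dropWhile_eq_nil_iff]; exact (pv_rstrip_eq_nil_iff t).mp ht
        rw [hst, htd]
        decide
      · have htd : t.dropWhile PySem.Chars.isspace ≠ [] := by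
          intro h
          exact ht ((pv_rstrip_eq_nil_iff t).mpr ((List.dropWhile_eq_nil_iff).mp h))
        have hst2 : PySem.Chars.rstrip (' ' :: t) = ' ' :: PySem.Chars.rstrip t := by
          rw [pv_rstrip_cons, if_neg ht]
        rw [hst2]
        have hsw : PySem.Chars.startswith ('#' :: ' ' :: PySem.Chars.rstrip t) ['#', ' '] = true := by
          simp [PySem.Chars.startswith, List.isPrefixOf]
        rw [if_pos hsw]
        have hslice : PySem.Chars.slice ('#' :: ' ' :: PySem.Chars.rstrip t) (some 2) none =
            PySem.Chars.rstrip t := by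
          have h2 : ((2 : Nat) : Int) = (2 : Int) := by norm_num
          rw [PySem.Chars.slice_eq_listSlice, ← h2, PySem.List.slice_from_natCast]
          rfl
        rw [hslice, hsgen, pv_dropWhile_rstrip, pv_rstrip_idem]
        cases hde : t.dropWhile PySem.Chars.isspace with
        | nil => exact absurd hde htd
        | cons x xs => rfl
    · rw [hstrip, hd, hL, if_neg hc, pv_rstrip_cons]
      by_cases h1 : PySem.Chars.rstrip (c2 :: t) = []
      · rw [if_pos h1]
        by_cases hcw : PySem.Chars.isspace c <;>
          simp [hcw, PySem.Chars.startswith, List.isPrefixOf]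
      · rw [if_neg h1, pv_rstrip_cons] at *
        by_cases h2 : PySem.Chars.rstrip t = []
        · rw [if_pos h2]
          by_cases hc2w : PySem.Chars.isspace c2 <;>
            simp [hc2w, PySem.Chars.startswith, List.isPrefixOf] <;>
            exact fun h1' h2' => hc ⟨h1'.symm, h2'.symm⟩
        · rw [if_neg h2]
          simp [PySem.Chars.startswith, List.isPrefixOf]
          intro h1' h2'
          exact absurd ⟨h1'.symm, h2'.symm⟩ hc
      
-- the whole loop equals findSome? of the line match
theorem pv_loop_lemma (ls : List (List Char)) :
    findTitleLoopA ls = (ls.findSome? pvRegexLineB).map String.ofList := by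
  induction ls with
  | nil => simp [findTitleLoopA]
  | cons l rest ih =>
    rw [List.findSome?_cons]
    have h := pv_line_lemma l
    unfold findTitleLoopA
    by_cases hs : PySem.Chars.startswith (PySem.Chars.strip l) ['#', ' '] = true
    · rw [if_pos hs] at h ⊢
      rw [← h]
      rfl
    · rw [if_neg hs] at h ⊢
      rw [← h]
      simpa using ih

-- ===== VERDICT (by name: the statement is the Claim_ definition above) =====
theorem find_title_spec : Claim_equal_find_title := by
  intro markdown _
  unfold Spec_find_title find_title find_title_alt
  exact pv_loop_lemma _
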